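-- pv_equiv track=rewrite | github.com/kandinskylab/kvae | kvae/models/kvae_3d.py | _build_split_list
-- ===== SOURCE A (Python) =====
-- def _build_split_list(t_len: int, seg_len: int = 16) -> list[int]:
--     split_list = [seg_len + 1]
--     n_frames = t_len - (seg_len + 1)
--     while n_frames > 0:
--         split_list.append(seg_len)
--         n_frames -= seg_len
--     split_list[-1] += n_frames
--     return split_list
-- ===== SOURCE B (Python) =====
-- def _build_split_list(t_len: int, seg_len: int = 16) -> list[int]:
--     n0 = t_len - (seg_len + 1)
--     if n0 <= 0:
--         return [t_len]
--     k = (n0 + seg_len - 1) // seg_len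
--     return [seg_len + 1] + [seg_len] * (k - 1) + [n0 - (k - 1) * seg_len]
-- ===== Notes on version B (the rewrite author's own statement) =====
-- stated objective: simpler
-- what changed: Replaces A's incremental append-and-fixup loop with a closed-form construction: ceiling-division segment count, then list literal + replicate + remainder element.
import Mathlib
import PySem

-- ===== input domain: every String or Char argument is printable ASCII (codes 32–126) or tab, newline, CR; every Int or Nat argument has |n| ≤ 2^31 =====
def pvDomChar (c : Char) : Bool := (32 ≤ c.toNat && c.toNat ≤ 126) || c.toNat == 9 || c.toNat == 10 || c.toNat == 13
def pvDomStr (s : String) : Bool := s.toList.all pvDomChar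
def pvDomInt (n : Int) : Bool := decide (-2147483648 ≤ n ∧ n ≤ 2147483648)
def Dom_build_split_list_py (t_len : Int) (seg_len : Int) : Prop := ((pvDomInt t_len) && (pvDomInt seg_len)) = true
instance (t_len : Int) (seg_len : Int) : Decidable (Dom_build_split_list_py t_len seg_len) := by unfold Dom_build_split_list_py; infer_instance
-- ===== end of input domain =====

-- B replaces A's append-and-fixup loop with a closed-form construction (objective: simpler).

-- ===== PORT A =====
-- the while loop: appends seg to the list and decrements n by seg while n > 0.
-- '0 < seg' in the guard is a totality guard only: Python diverges there (excluded by Pre_).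
def buildLoopA (seg : Int) (acc : List Int) (n : Int) : List Int × Int :=
  if _h : 0 < n ∧ 0 < seg then buildLoopA seg (acc ++ [seg]) (n - seg)
  else (acc, n)
termination_by n.toNat
decreasing_by omega

-- split_list[-1] += d  (Python raises on []; the list here is always nonempty)
def addLastA : List Int → Int → List Int
  | [], _ => []
  | [x], d => [x + d]
  | x :: xs, d => x :: addLastA xs d

def build_split_list_py (t_len : Int) (seg_len : Int) : List Int :=
  let p := buildLoopA seg_len [seg_len + 1] (t_len - (seg_len + 1))
  addLastA p.1 p.2

-- ===== PORT B =====
def build_split_list_py_alt (t_len : Int) (seg_len : Int) : List Int :=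
  let n0 := t_len - (seg_len + 1)
  if n0 ≤ 0 then [t_len]
  else
    let k := PySem.Int.floordiv (n0 + seg_len - 1) seg_len
    (seg_len + 1) :: (List.replicate (k - 1).toNat seg_len ++ [n0 - (k - 1) * seg_len])

-- ===== PRECONDITION & SPEC =====
-- Pre_ excludes exactly the inputs where A's while loop never terminates
-- (seg_len ≤ 0 with t_len > seg_len + 1): A returns on no other inputs.
def Pre_build_split_list_py (t_len : Int) (seg_len : Int) : Prop :=
  0 < seg_len ∨ t_len ≤ seg_len + 1
instance (t_len : Int) (seg_len : Int) : Decidable (Pre_build_split_list_py t_len seg_len) := by unfold Pre_build_split_list_py; infer_instance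
def pvWitness_build_split_list_py : Int × Int := (50, 16)

def Spec_build_split_list_py (t_len : Int) (seg_len : Int) (out : List Int) : Prop := out = build_split_list_py_alt t_len seg_len
instance (t_len : Int) (seg_len : Int) (out : List Int) : Decidable (Spec_build_split_list_py t_len seg_len out) := by unfold Spec_build_split_list_py; infer_instance

-- ===== CLAIM (what is proved, stated in full; the proofs are below) =====
def Claim_equal_build_split_list_py : Prop := ∀ (t_len : Int) (seg_len : Int), Dom_build_split_list_py t_len seg_len → Pre_build_split_list_py t_len seg_len → Spec_build_split_list_py t_len seg_len (build_split_list_py t_len seg_len)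

-- ===== LEMMAS AND PROOFS =====

theorem addLastA_append (l : List Int) (x d : Int) :
    addLastA (l ++ [x]) d = l ++ [x + d] := by
  induction l with
  | nil => simp [addLastA]
  | cons y ys ih =>
    cases ys with
    | nil => simp [addLastA]
    | cons z zs => simpa [addLastA] using ih

-- loop invariant: for 0 < seg, 0 < n, the loop appends ceil(n/seg) copies of seg
theorem buildLoopA_eq (seg : Int) (hs : 0 < seg) (n : Int) (hn : 0 < n) (acc : List Int) :
    buildLoopA seg acc n =
      (acc ++ List.replicate ((n + seg - 1) / seg - 1).toNat seg ++ [seg],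
       n - ((n + seg - 1) / seg) * seg) := by
  rw [buildLoopA, dif_pos ⟨hn, hs⟩]
  by_cases h2 : 0 < n - seg
  · rw [buildLoopA_eq seg hs (n - seg) h2 (acc ++ [seg])]
    have hq' : (n - seg + seg - 1) / seg = (n - 1) / seg := by ring_nf
    have hq : (n + seg - 1) / seg = (n - 1) / seg + 1 := by
      have h := Int.add_mul_ediv_right (n - 1) 1 (show seg ≠ 0 by omega)
      have e : n + seg - 1 = n - 1 + 1 * seg := by ring
      rw [e, h]
    have hge : 1 ≤ (n - 1) / seg := by
      rw [Int.le_ediv_iff_mul_le hs]; omega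
    rw [hq', hq]
    simp only [Prod.mk.injEq]
    constructor
    · have : ((n - 1) / seg + 1 - 1).toNat = ((n - 1) / seg - 1).toNat + 1 := by omega
      rw [this, List.replicate_succ]
      simp
    · ring
  · rw [buildLoopA, dif_neg (by omega)]
    have h1 : (n + seg - 1) / seg = 1 := by
      have h := Int.add_mul_ediv_right (n - 1) 1 (show seg ≠ 0 by omega)
      have e : n + seg - 1 = n - 1 + 1 * seg := by ring
      have z : (n - 1) / seg = 0 := Int.ediv_eq_zero_of_lt (by omega) (by omega)
      rw [e, h, z]; norm_num
    rw [h1]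
    simp
termination_by n.toNat
decreasing_by omega

theorem build_split_list_py_spec : Claim_equal_build_split_list_py := by
  intro t seg _hdom hpre
  unfold Spec_build_split_list_py build_split_list_py build_split_list_py_alt
  by_cases h : t - (seg + 1) ≤ 0
  · rw [buildLoopA, dif_neg (by omega)]
    simp only [h, if_pos]
    show addLastA [seg + 1] (t - (seg + 1)) = [t]
    simp [addLastA]
  · have hs : 0 < seg := by rcases hpre with h' | h' <;> omega
    have hn : 0 < t - (seg + 1) := by omega
    rw [buildLoopA_eq seg hs _ hn]
    simp only [h, if_neg, not_false_iff]
    rw [PySem.Int.floordiv_eq_ediv_of_pos hs]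
    set q := (t - (seg + 1) + seg - 1) / seg with hqdef
    have : [seg + 1] ++ List.replicate (q - 1).toNat seg ++ [seg] =
        ((seg + 1) :: List.replicate (q - 1).toNat seg) ++ [seg] := by simp
    rw [this, addLastA_append]
    simp only [List.cons_append]
    congr 1
    congr 1
    ring
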